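-- pv_equiv track=rewrite | github.com/MKY508/momentum-lens | backend/core/trade_controller.py | _are_similar_etfs
-- ===== SOURCE A (Python) =====
-- def _are_similar_etfs(etf1: str, etf2: str) -> bool:
--     """
--     判断两个ETF是否过于相似
--     简单规则：同行业或高相关性
--     """
--     # 半导体相关
--     semiconductor_etfs = ['512760', '512480', '159801']
--     # 新能源相关
--     new_energy_etfs = ['516160', '515790', '515030', '588000']
--     # 科技相关
--     tech_etfs = ['512720', '515000', '159939']
--
--     etf_groups = [semiconductor_etfs, new_energy_etfs, tech_etfs]
--
--     for group in etf_groups: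
--         if etf1 in group and etf2 in group:
--             return True
--
--     return False
-- ===== SOURCE B (Python) =====
-- def _are_similar_etfs(etf1: str, etf2: str) -> bool:
--     """Same-industry check via one code->group-id index instead of scanning groups."""
--     semiconductor_etfs = ['512760', '512480', '159801']
--     new_energy_etfs = ['516160', '515790', '515030', '588000']
--     tech_etfs = ['512720', '515000', '159939']
--
--     index = {}
--     for gid, group in enumerate([semiconductor_etfs, new_energy_etfs, tech_etfs]):
--         for code in group:
--             index[code] = gid
--
--     return etf1 in index and index.get(etf1) == index.get(etf2)
-- ===== Notes on version B (the rewrite author's own statement) =====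
-- stated objective: idiomatic
-- what changed: Replaces the scan over the three group lists with a dict built once mapping each code to a group id; the answer is two lookups and an equality (with an explicit presence check so unknown codes give False).
import Mathlib
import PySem

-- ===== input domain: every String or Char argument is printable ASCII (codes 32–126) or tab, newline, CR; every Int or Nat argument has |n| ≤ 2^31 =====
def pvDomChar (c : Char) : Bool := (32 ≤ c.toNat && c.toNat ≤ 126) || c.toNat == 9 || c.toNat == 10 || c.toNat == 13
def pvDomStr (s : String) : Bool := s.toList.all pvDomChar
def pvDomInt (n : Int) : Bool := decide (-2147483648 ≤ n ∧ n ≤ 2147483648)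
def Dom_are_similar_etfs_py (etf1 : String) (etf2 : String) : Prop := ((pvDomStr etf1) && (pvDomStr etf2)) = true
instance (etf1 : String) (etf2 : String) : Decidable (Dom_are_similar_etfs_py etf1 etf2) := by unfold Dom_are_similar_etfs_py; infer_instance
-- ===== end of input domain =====

-- B replaces A's scan over the three group lists with a code→group-id dict built once,
-- answering with two lookups and an equality (idiomatic; not claimed faster).

-- ===== PORT A =====
def pySemiconductorEtfs : List String := ["512760", "512480", "159801"]
def pyNewEnergyEtfs : List String := ["516160", "515790", "515030", "588000"]
def pyTechEtfs : List String := ["512720", "515000", "159939"]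
def pyEtfGroups : List (List String) := [pySemiconductorEtfs, pyNewEnergyEtfs, pyTechEtfs]

-- the 'for group in etf_groups' loop with its early 'return True'
def pyGroupLoop (etf1 etf2 : String) : List (List String) → Bool
  | [] => false
  | group :: rest =>
      if group.contains etf1 && group.contains etf2 then true
      else pyGroupLoop etf1 etf2 rest

def are_similar_etfs_py (etf1 : String) (etf2 : String) : Bool :=
  pyGroupLoop etf1 etf2 pyEtfGroups

-- ===== PORT B =====
-- index = {}; for gid, group in enumerate(groups): for code in group: index[code] = gid
def bEtfIndex : PySem.Dict String Int :=
  (PySem.List.enumerate pyEtfGroups).foldl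
    (fun d p => p.2.foldl (fun d code => d.insert code p.1) d)
    PySem.Dict.empty

def are_similar_etfs_py_alt (etf1 : String) (etf2 : String) : Bool :=
  (bEtfIndex.get? etf1).isSome && (bEtfIndex.get? etf1 == bEtfIndex.get? etf2)

-- ===== PRECONDITION & SPEC =====
def Spec_are_similar_etfs_py (etf1 : String) (etf2 : String) (out : Bool) : Prop := out = are_similar_etfs_py_alt etf1 etf2
instance (etf1 : String) (etf2 : String) (out : Bool) : Decidable (Spec_are_similar_etfs_py etf1 etf2 out) := by unfold Spec_are_similar_etfs_py; infer_instance

-- ===== CLAIM (what is proved, stated in full; the proofs are below) =====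
def Claim_equal_are_similar_etfs_py : Prop := ∀ (etf1 : String) (etf2 : String), Dom_are_similar_etfs_py etf1 etf2 → Spec_are_similar_etfs_py etf1 etf2 (are_similar_etfs_py etf1 etf2)

-- ===== LEMMAS AND PROOFS =====

-- all ten codes appearing in the three groups
def pvAllCodes : List String :=
  ["512760", "512480", "159801", "516160", "515790", "515030", "588000", "512720", "515000", "159939"]

-- the built index, evaluated to a literal dict
theorem bEtfIndex_eq :
    bEtfIndex = PySem.Dict.mk
      [("512760", 0), ("512480", 0), ("159801", 0),
       ("516160", 1), ("515790", 1), ("515030", 1), ("588000", 1),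
       ("512720", 2), ("515000", 2), ("159939", 2)] := by decide

theorem get?_none_of_not_mem (e : String) (h : e ∉ pvAllCodes) : bEtfIndex.get? e = none := by
  simp only [pvAllCodes, List.mem_cons, List.not_mem_nil, or_false, not_or] at h
  obtain ⟨h1, h2, h3, h4, h5, h6, h7, h8, h9, h10⟩ := h
  rw [bEtfIndex_eq]
  simp [Ne.symm h1, Ne.symm h2, Ne.symm h3, Ne.symm h4, Ne.symm h5,
    Ne.symm h6, Ne.symm h7, Ne.symm h8, Ne.symm h9, Ne.symm h10, PySem.Dict.get?]

theorem loop_false_of_not_mem_left (e1 e2 : String) (h : e1 ∉ pvAllCodes) :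
    pyGroupLoop e1 e2 pyEtfGroups = false := by
  simp only [pvAllCodes, List.mem_cons, List.not_mem_nil, or_false, not_or] at h
  obtain ⟨h1, h2, h3, h4, h5, h6, h7, h8, h9, h10⟩ := h
  simp [pyGroupLoop, pyEtfGroups, pySemiconductorEtfs, pyNewEnergyEtfs, pyTechEtfs,
    h1, h2, h3, h4, h5, h6, h7, h8, h9, h10]

theorem loop_false_of_not_mem_right (e1 e2 : String) (h : e2 ∉ pvAllCodes) :
    pyGroupLoop e1 e2 pyEtfGroups = false := by
  simp only [pvAllCodes, List.mem_cons, List.not_mem_nil, or_false, not_or] at h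
  obtain ⟨h1, h2, h3, h4, h5, h6, h7, h8, h9, h10⟩ := h
  simp [pyGroupLoop, pyEtfGroups, pySemiconductorEtfs, pyNewEnergyEtfs, pyTechEtfs,
    h1, h2, h3, h4, h5, h6, h7, h8, h9, h10]

-- ===== VERDICT (by name: the statement is the Claim_ definition above) =====
theorem are_similar_etfs_py_spec : Claim_equal_are_similar_etfs_py := by
  intro etf1 etf2 _
  unfold Spec_are_similar_etfs_py
  by_cases h1 : etf1 ∈ pvAllCodes
  · by_cases h2 : etf2 ∈ pvAllCodes
    · fin_cases h1 <;> fin_cases h2 <;> decide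
    · rw [show are_similar_etfs_py etf1 etf2 = false from
        loop_false_of_not_mem_right etf1 etf2 h2]
      unfold are_similar_etfs_py_alt
      rw [get?_none_of_not_mem etf2 h2]
      cases bEtfIndex.get? etf1 <;> simp
  · rw [show are_similar_etfs_py etf1 etf2 = false from loop_false_of_not_mem_left etf1 etf2 h1]
    unfold are_similar_etfs_py_alt
    rw [get?_none_of_not_mem etf1 h1]
    simp
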